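-- pv_equiv track=rewrite | github.com/vavkamil/xss2png | xss2png.py | reverse_filter_1
-- ===== SOURCE A (Python) =====
-- def to_ord_array(bin_string):
--     return [ord(char) for char in bin_string]
--
-- def reverse_filter_1(bin_string):
--     p = to_ord_array(bin_string)
--     s = len(p)
--
--     payload = []
--     i = 0
--     while i < (len(p) - 3):
--         p[i + 3] = (p[i + 3] + p[i]) % 256
--         i += 1
--     for filter1 in p:
--         payload.append(filter1)
--     return payload
-- ===== SOURCE B (Python) =====
-- def every_third(vals):
--     out = []
--     i = 0
--     while i < len(vals):
--         out.append(vals[i])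
--         i += 3
--     return out
--
-- def column_sums(vals):
--     s = 0
--     out = []
--     for v in vals:
--         s = (s + v) % 256
--         out.append(s)
--     return out
--
-- def reverse_filter_1(bin_string):
--     # Decompose by index residue mod 3: each residue class is an independent
--     # running prefix sum mod 256.  Compute the three column sums separately,
--     # then read the columns back row by row.
--     vals = [ord(c) for c in bin_string]
--     c0 = column_sums(every_third(vals))
--     c1 = column_sums(every_third(vals[1:]))
--     c2 = column_sums(every_third(vals[2:]))
--     out = []
--     for q in range(len(c0)):
--         out.append(c0[q])
--         if q < len(c1):
--             out.append(c1[q])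
--         if q < len(c2):
--             out.append(c2[q])
--     return out
-- ===== Notes on version B (the rewrite author's own statement) =====
-- stated objective: alternative
-- what changed: Replaced A's in-place index+3 mutation over one array (plus a copy loop) by a staged decomposition: deinterleave the codes into three residue-class columns, compute each column's running prefix sums mod 256 independently, then read the columns back row by row.
import Mathlib
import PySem

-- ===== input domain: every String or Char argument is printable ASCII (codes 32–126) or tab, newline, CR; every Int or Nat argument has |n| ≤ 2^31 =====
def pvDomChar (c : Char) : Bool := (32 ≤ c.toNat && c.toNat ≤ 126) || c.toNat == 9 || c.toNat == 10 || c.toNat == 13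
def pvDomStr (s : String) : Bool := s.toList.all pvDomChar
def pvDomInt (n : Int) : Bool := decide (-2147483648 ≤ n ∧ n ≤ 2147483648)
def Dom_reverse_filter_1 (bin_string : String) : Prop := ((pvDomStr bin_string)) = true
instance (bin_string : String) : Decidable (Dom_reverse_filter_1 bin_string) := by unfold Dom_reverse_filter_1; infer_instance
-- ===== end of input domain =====

-- B replaces A's in-place index+3 mutation pass (plus copy pass) by a staged decomposition:
-- deinterleave the codes into three residue-class columns, running-sum each column mod 256,
-- and read the columns back row by row (objective: alternative; same O(n) cost).

-- ===== PORT A =====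
-- while i < len(p) - 3: p[i+3] = (p[i+3] + p[i]) % 256; i += 1
-- (getD 0 is a totality guard only: the loop condition keeps both indices in range)
def pvLoopA (p : List Int) (i : Nat) : List Int :=
  if _h : i + 3 < p.length then
    pvLoopA (p.set (i + 3) (PySem.Int.mod (p.getD (i + 3) 0 + p.getD i 0) 256)) (i + 1)
  else p
termination_by p.length - i
decreasing_by simp [List.length_set]; omega

def reverse_filter_1 (bin_string : String) : List Int :=
  let p := bin_string.toList.map (fun c => (c.toNat : Int))
  let p := pvLoopA p 0
  -- for filter1 in p: payload.append(filter1)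
  p.foldl (fun payload filter1 => payload ++ [filter1]) []

-- ===== PORT B =====
-- every_third: while i < len(vals): out.append(vals[i]); i += 3
-- (getD 0 is a totality guard only: the loop condition keeps the index in range)
def pvETLoop (vals out : List Int) (i : Nat) : List Int :=
  if _h : i < vals.length then pvETLoop vals (out ++ [vals.getD i 0]) (i + 3) else out
termination_by vals.length - i

def pvEveryThird (vals : List Int) : List Int := pvETLoop vals [] 0

-- column_sums: s = 0; for v in vals: s = (s + v) % 256; out.append(s)
def pvColumnSums (vals : List Int) : List Int :=
  (vals.foldl (fun (st : Int × List Int) v =>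
      let s := PySem.Int.mod (st.1 + v) 256; (s, st.2 ++ [s])) (0, ([] : List Int))).2

def reverse_filter_1_alt (bin_string : String) : List Int :=
  let vals := bin_string.toList.map (fun c => (c.toNat : Int))
  let c0 := pvColumnSums (pvEveryThird vals)
  let c1 := pvColumnSums (pvEveryThird (vals.drop 1))  -- vals[1:]
  let c2 := pvColumnSums (pvEveryThird (vals.drop 2))  -- vals[2:]
  -- for q in range(len(c0)): append c0[q]; if q < len(c1): append c1[q]; if q < len(c2): append c2[q]
  (List.range c0.length).foldl (fun out q =>
    let out := out ++ [c0.getD q 0]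
    let out := if q < c1.length then out ++ [c1.getD q 0] else out
    if q < c2.length then out ++ [c2.getD q 0] else out) []

-- ===== PRECONDITION & SPEC =====
def Spec_reverse_filter_1 (bin_string : String) (out : List Int) : Prop := out = reverse_filter_1_alt bin_string
instance (bin_string : String) (out : List Int) : Decidable (Spec_reverse_filter_1 bin_string out) := by unfold Spec_reverse_filter_1; infer_instance

-- ===== CLAIM (what is proved, stated in full; the proofs are below) =====
def Claim_equal_reverse_filter_1 : Prop := ∀ (bin_string : String), Dom_reverse_filter_1 bin_string → Spec_reverse_filter_1 bin_string (reverse_filter_1 bin_string)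

-- ===== LEMMAS AND PROOFS =====

-- reference scan both sides are reduced to: rotating three accumulators, every output modded
def scanB (a b c : Int) : List Int → List Int
  | [] => []
  | v :: rest => PySem.Int.mod (v + a) 256 :: scanB b c (PySem.Int.mod (v + a) 256) rest

-- A's loop result as a rotating scan whose first element per class stays raw
def pvAltGo (a b c : Option Int) (l : List Int) : List Int :=
  match l with
  | [] => []
  | v :: rest =>
    let w := match a with
      | none => v
      | some x => PySem.Int.mod (v + x) 256
    w :: pvAltGo b c (some w) rest

-- proof-only counterparts of B's loops
def every3 : List Int → List Int
  | [] => []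
  | [v] => [v]
  | [v, _] => [v]
  | v :: _ :: _ :: rest => v :: every3 rest

theorem every3_cons (v : Int) (t : List Int) :
    every3 (v :: t) = v :: every3 (t.drop 2) := by
  match t with
  | [] => rfl
  | [w] => rfl
  | w :: x :: rest => rfl

def accRec (s : Int) : List Int → List Int
  | [] => []
  | v :: rest => PySem.Int.mod (s + v) 256 :: accRec (PySem.Int.mod (s + v) 256) rest

def interRow : List Int → List Int → List Int → List Int
  | [], _, _ => []
  | x :: xs, c1, c2 => x :: (c1.take 1 ++ c2.take 1 ++ interRow xs (c1.drop 1) (c2.drop 1))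

theorem foldl_append_singleton (l acc : List Int) :
    l.foldl (fun payload filter1 => payload ++ [filter1]) acc = acc ++ l := by
  induction l generalizing acc with
  | nil => simp
  | cons x xs ih => simp [List.foldl, ih]

-- loop invariant: positions < i+3 are final; the rest is the scan seeded with p[i..i+2]
theorem pvLoopA_eq_altGo (p : List Int) (i : Nat) :
    pvLoopA p i = p.take (i + 3) ++ pvAltGo p[i]? p[i + 1]? p[i + 2]? (p.drop (i + 3)) := by
  have H : ∀ (n : Nat) (p : List Int) (i : Nat), p.length - i ≤ n →
      pvLoopA p i = p.take (i + 3) ++ pvAltGo p[i]? p[i + 1]? p[i + 2]? (p.drop (i + 3)) := by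
    intro n
    induction n with
    | zero =>
      intro p i hn
      have h : ¬ i + 3 < p.length := by omega
      rw [pvLoopA]
      simp only [h, dite_false]
      rw [List.take_of_length_le (by omega), List.drop_of_length_le (by omega)]
      simp [pvAltGo]
    | succ n ih =>
      intro p i hn
      by_cases h : i + 3 < p.length
      · rw [pvLoopA]
        simp only [h, dite_true]
        set w := PySem.Int.mod (p.getD (i + 3) 0 + p.getD i 0) 256 with hw
        rw [ih (p.set (i + 3) w) (i + 1) (by simp [List.length_set]; omega)]
        have hi : i < p.length := by omega
        have hi1 : i + 1 < p.length := by omega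
        have hi2 : i + 2 < p.length := by omega
        have htake : (p.set (i + 3) w).take (i + 1 + 3) = p.take (i + 3) ++ [w] := by
          rw [show i + 1 + 3 = (i + 3) + 1 by omega]
          rw [List.take_set]
          rw [List.set_eq_take_cons_drop _ (by simp [List.length_take]; omega)]
          rw [List.take_take, List.drop_take]
          simp
        have hg1 : (p.set (i + 3) w)[i + 1]? = p[i + 1]? := by
          rw [List.getElem?_set_ne (by omega)]
        have hg2 : (p.set (i + 3) w)[i + 1 + 1]? = p[i + 2]? := by
          rw [show i + 1 + 1 = i + 2 by omega, List.getElem?_set_ne (by omega)]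
        have hg3 : (p.set (i + 3) w)[i + 1 + 2]? = some w := by
          rw [show i + 1 + 2 = i + 3 by omega, List.getElem?_set_self h]
        have hdrop : (p.set (i + 3) w).drop (i + 1 + 3) = p.drop (i + 4) := by
          rw [show i + 1 + 3 = i + 4 by omega, List.drop_set]
          simp
        rw [htake, hg1, hg2, hg3, hdrop]
        have hdrop3 : p.drop (i + 3) = p[i + 3] :: p.drop (i + 4) := by
          rw [List.drop_eq_getElem_cons h]
        rw [hdrop3, List.getElem?_eq_getElem hi]
        have hwv : w = PySem.Int.mod (p[i + 3] + p[i]) 256 := by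
          rw [hw, List.getD_eq_getElem?_getD, List.getD_eq_getElem?_getD,
            List.getElem?_eq_getElem h, List.getElem?_eq_getElem hi]
          rfl
        simp only [pvAltGo, ← hwv, List.append_assoc, List.singleton_append]
      · rw [pvLoopA]
        simp only [h, dite_false]
        rw [List.take_of_length_le (by omega), List.drop_of_length_le (by omega)]
        simp [pvAltGo]
  exact H (p.length - i) p i le_rfl

theorem pvAltGo_start (p : List Int) :
    pvAltGo none none none p = p.take 3 ++ pvAltGo p[0]? p[1]? p[2]? (p.drop 3) := by
  match p with
  | [] => simp [pvAltGo]
  | [v0] => simp [pvAltGo]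
  | [v0, v1] => simp [pvAltGo]
  | v0 :: v1 :: v2 :: rest => simp [pvAltGo]

-- on already-reduced inputs the raw first element per class equals the modded one
theorem altGo_eq_scanB (l : List Int) : ∀ (oa ob oc : Option Int),
    (∀ v ∈ l, PySem.Int.mod v 256 = v) →
    pvAltGo oa ob oc l = scanB (oa.getD 0) (ob.getD 0) (oc.getD 0) l := by
  induction l with
  | nil => intro oa ob oc h; simp [pvAltGo, scanB]
  | cons v rest ih =>
    intro oa ob oc h
    have hv : PySem.Int.mod v 256 = v := h v (by simp)
    have hrest : ∀ x ∈ rest, PySem.Int.mod x 256 = x := fun x hx => h x (by simp [hx])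
    cases oa with
    | none =>
      simp only [pvAltGo, scanB, Option.getD_none, add_zero, hv]
      rw [ih _ _ _ hrest]
      simp
    | some x =>
      simp only [pvAltGo, scanB, Option.getD_some]
      rw [ih _ _ _ hrest]
      simp

-- every_third's loop from index i yields every third element of the drop
theorem pvETLoop_eq (vals : List Int) (i : Nat) (out : List Int) :
    pvETLoop vals out i = out ++ every3 (vals.drop i) := by
  have H : ∀ (n : Nat) (i : Nat) (out : List Int), vals.length - i ≤ n →
      pvETLoop vals out i = out ++ every3 (vals.drop i) := by
    intro n
    induction n with
    | zero =>
      intro i out hn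
      have h : ¬ i < vals.length := by omega
      rw [pvETLoop]
      simp only [h, dite_false]
      rw [List.drop_of_length_le (by omega)]
      simp [every3]
    | succ n ih =>
      intro i out hn
      by_cases h : i < vals.length
      · rw [pvETLoop]
        simp only [h, dite_true]
        rw [ih (i + 3) _ (by omega)]
        have hd : vals.drop i = vals[i] :: vals.drop (i + 1) := List.drop_eq_getElem_cons h
        have hgd : vals.getD i 0 = vals[i] := by
          rw [List.getD_eq_getElem?_getD, List.getElem?_eq_getElem h]; rfl
        rw [hd, every3_cons, hgd]
        have : (vals.drop (i + 1)).drop 2 = vals.drop (i + 3) := by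
          rw [List.drop_drop]
        rw [this]
        simp
      · rw [pvETLoop]
        simp only [h, dite_false]
        rw [List.drop_of_length_le (by omega)]
        simp [every3]
  exact H (vals.length - i) i out le_rfl

theorem pvColumnSums_eq (l : List Int) :
    pvColumnSums l = accRec 0 l := by
  have H : ∀ (l : List Int) (s : Int) (acc : List Int),
      (l.foldl (fun (st : Int × List Int) v =>
        let w := PySem.Int.mod (st.1 + v) 256; (w, st.2 ++ [w])) (s, acc)).2
        = acc ++ accRec s l := by
    intro l
    induction l with
    | nil => intro s acc; simp [accRec]
    | cons v rest ih =>
      intro s acc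
      simp only [List.foldl]
      rw [ih]
      simp [accRec]
  unfold pvColumnSums
  rw [H]
  simp

theorem take_one_drop (cs : List Int) (q : Nat) :
    (cs.drop q).take 1 = if q < cs.length then [cs.getD q 0] else [] := by
  by_cases h : q < cs.length
  · rw [List.drop_eq_getElem_cons h, List.getD_eq_getElem?_getD,
      List.getElem?_eq_getElem h, if_pos h]
    rfl
  · rw [List.drop_of_length_le (by omega)]
    simp [h]

-- the row-reading loop equals the recursive row interleave
theorem rowLoop_eq (c0 c1 c2 : List Int) (m q : Nat) (out : List Int)
    (hm : q + m = c0.length) :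
    (List.range' q m).foldl (fun out q =>
      let out := out ++ [c0.getD q 0]
      let out := if q < c1.length then out ++ [c1.getD q 0] else out
      if q < c2.length then out ++ [c2.getD q 0] else out) out
      = out ++ interRow (c0.drop q) (c1.drop q) (c2.drop q) := by
  induction m generalizing q out with
  | zero =>
    rw [List.drop_of_length_le (by omega)]
    simp [interRow]
  | succ m ih =>
    rw [List.range'_succ, List.foldl_cons, ih (q + 1) _ (by omega)]
    have hq : q < c0.length := by omega
    rw [List.drop_eq_getElem_cons hq]
    have hgd : c0.getD q 0 = c0[q] := by
      rw [List.getD_eq_getElem?_getD, List.getElem?_eq_getElem hq]; rfl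
    simp only [interRow, take_one_drop, ← List.drop_drop, hgd]
    split_ifs <;> simp
theorem rowLoop_full (c0 c1 c2 : List Int) :
    (List.range c0.length).foldl (fun out q =>
      let out := out ++ [c0.getD q 0]
      let out := if q < c1.length then out ++ [c1.getD q 0] else out
      if q < c2.length then out ++ [c2.getD q 0] else out) []
      = interRow c0 c1 c2 := by
  rw [List.range_eq_range', rowLoop_eq c0 c1 c2 c0.length 0 [] (by omega)]
  simp

-- the three interleaved column scans are the rotating scan
theorem interRow_eq_scanB (l : List Int) (a b c : Int) :
    interRow (accRec a (every3 l)) (accRec b (every3 (l.drop 1))) (accRec c (every3 (l.drop 2)))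
      = scanB a b c l := by
  have H : ∀ (n : Nat) (l : List Int), l.length ≤ n → ∀ (a b c : Int),
      interRow (accRec a (every3 l)) (accRec b (every3 (l.drop 1))) (accRec c (every3 (l.drop 2)))
        = scanB a b c l := by
    intro n
    induction n with
    | zero =>
      intro l hl a b c
      have : l = [] := List.eq_nil_of_length_eq_zero (by omega)
      subst this
      simp [every3, accRec, interRow, scanB]
    | succ n ih =>
      intro l hl a b c
      match l with
      | [] => simp [every3, accRec, interRow, scanB]
      | [v1] =>
        simp [every3, accRec, interRow, scanB, Int.add_comm]
      | [v1, v2] =>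
        simp [every3, accRec, interRow, scanB, Int.add_comm]
      | v1 :: v2 :: v3 :: rest =>
        have h0 : every3 (v1 :: v2 :: v3 :: rest) = v1 :: every3 rest := by
          rw [every3_cons]; simp
        have h1 : every3 ((v1 :: v2 :: v3 :: rest).drop 1) = v2 :: every3 (rest.drop 1) := by
          simp only [List.drop_succ_cons, List.drop_zero]
          rw [every3_cons]; simp
        have h2 : every3 ((v1 :: v2 :: v3 :: rest).drop 2) = v3 :: every3 (rest.drop 2) := by
          simp only [List.drop_succ_cons, List.drop_zero]
          rw [every3_cons]
        rw [h0, h1, h2]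
        simp only [accRec, interRow, List.drop_succ_cons, List.drop_zero, scanB]
        rw [ih rest (by simp at hl ⊢; omega)]
        simp [Int.add_comm]
  exact H l.length l le_rfl a b c

-- the domain gives already-reduced codes
theorem dom_codes_reduced (s : String) (hd : Dom_reverse_filter_1 s) :
    ∀ v ∈ s.toList.map (fun c => (c.toNat : Int)), PySem.Int.mod v 256 = v := by
  intro v hv
  rcases List.mem_map.mp hv with ⟨ch, hch, rfl⟩
  have hdc : pvDomChar ch = true := by
    have := (List.all_eq_true.mp hd) ch hch
    exact this
  have hle : ch.toNat ≤ 126 := by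
    simp [pvDomChar] at hdc
    omega
  have h0 : (0 : Int) ≤ (ch.toNat : Int) := by positivity
  have h256 : (ch.toNat : Int) < 256 := by exact_mod_cast Nat.lt_of_le_of_lt hle (by omega)
  rw [PySem.Int.mod_eq_emod_of_pos (by omega : (0:Int) < 256)]
  exact Int.emod_eq_of_lt h0 h256

-- ===== VERDICT (by name: the statement is the Claim_ definition above) =====
theorem reverse_filter_1_spec : Claim_equal_reverse_filter_1 := by
  intro s hd
  unfold Spec_reverse_filter_1 reverse_filter_1 reverse_filter_1_alt
  simp only
  set vals := s.toList.map (fun c => (c.toNat : Int)) with hvals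
  rw [foldl_append_singleton, List.nil_append, pvLoopA_eq_altGo, ← pvAltGo_start,
    altGo_eq_scanB vals none none none (dom_codes_reduced s hd)]
  rw [pvEveryThird, pvETLoop_eq, List.nil_append, List.drop_zero,
    pvColumnSums_eq, pvColumnSums_eq, pvColumnSums_eq,
    pvEveryThird, pvETLoop_eq, List.nil_append, List.drop_zero,
    pvEveryThird, pvETLoop_eq, List.nil_append, List.drop_zero,
    rowLoop_full, interRow_eq_scanB]
  rfl
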